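-- pv_equiv track=rewrite | github.com/MrBrantCode/unitest_baseline | mut_generate/mist_train_taco/taco_11696/solution.py | find_longest_prefix_index
-- ===== SOURCE A (Python) =====
-- def find_longest_prefix_index(arr, X, Y, N):
--     countx = 0
--     county = 0
--     index = -1
--
--     for i in range(N):
--         if arr[i] == X:
--             countx += 1
--         elif arr[i] == Y:
--             county += 1
--
--         if countx == county:
--             index = i
--
--     return index
-- ===== SOURCE B (Python) =====
-- def find_longest_prefix_index(arr, X, Y, N):
--     # pass 1: build the prefix-balance table (count of X minus count of Y)
--     bal = []
--     b = 0
--     for i in range(N):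
--         v = arr[i]
--         if v == X:
--             b += 1
--         elif v == Y:
--             b -= 1
--         bal.append(b)
--     # pass 2: scan the table backwards for the last balanced prefix
--     for i in range(len(bal) - 1, -1, -1):
--         if bal[i] == 0:
--             return i
--     return -1
-- ===== Notes on version B (the rewrite author's own statement) =====
-- stated objective: alternative
-- what changed: Replaces A's fused single pass tracking two counters and a running best index with two differently shaped passes: build the prefix-balance table, then scan it backwards and return the first (i.e. last) zero.
import Mathlib
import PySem

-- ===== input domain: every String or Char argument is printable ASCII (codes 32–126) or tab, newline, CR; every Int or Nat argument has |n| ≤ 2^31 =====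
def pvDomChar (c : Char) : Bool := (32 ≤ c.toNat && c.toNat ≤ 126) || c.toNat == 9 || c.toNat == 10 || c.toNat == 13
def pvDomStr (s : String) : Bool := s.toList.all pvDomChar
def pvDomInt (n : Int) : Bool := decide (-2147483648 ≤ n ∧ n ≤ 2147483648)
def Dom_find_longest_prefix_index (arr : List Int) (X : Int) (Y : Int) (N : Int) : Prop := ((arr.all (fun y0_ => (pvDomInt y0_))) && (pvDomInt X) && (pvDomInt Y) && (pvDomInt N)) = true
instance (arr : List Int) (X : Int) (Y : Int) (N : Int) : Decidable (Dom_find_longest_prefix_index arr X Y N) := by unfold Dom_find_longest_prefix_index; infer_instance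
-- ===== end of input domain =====

-- B replaces A's fused single pass (two counters + running best index) with two passes:
-- build the prefix-balance table, then scan it backwards for the first (= last) zero. Equal cost.

-- ===== PORT A =====
def find_longest_prefix_index (arr : List Int) (X : Int) (Y : Int) (N : Int) : Int :=
  ((PySem.List.pyRange 0 N 1).foldl
    (fun (st : Int × Int × Int) i =>
      let v := PySem.List.pyGetD arr i 0
      let p := if v = X then (st.1 + 1, st.2.1)
               else if v = Y then (st.1, st.2.1 + 1)
               else (st.1, st.2.1)
      (p.1, p.2, if p.1 = p.2 then i else st.2.2))
    (0, 0, -1)).2.2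

-- ===== PORT B =====
-- the backward scan 'for i in range(len(bal)-1, -1, -1): if bal[i] == 0: return i' with final 'return -1'
def pvFindZero (bal : List Int) : List Int → Int
  | [] => -1
  | i :: rest => if PySem.List.pyGetD bal i 0 = 0 then i else pvFindZero bal rest

def find_longest_prefix_index_alt (arr : List Int) (X : Int) (Y : Int) (N : Int) : Int :=
  let bal := ((PySem.List.pyRange 0 N 1).foldl
    (fun (st : List Int × Int) i =>
      let v := PySem.List.pyGetD arr i 0
      let b := if v = X then st.2 + 1 else if v = Y then st.2 - 1 else st.2
      (st.1 ++ [b], b)) ([], 0)).1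
  pvFindZero bal (PySem.List.pyRange ((bal.length : Int) - 1) (-1) (-1))

-- ===== PRECONDITION & SPEC =====
-- Pre_ excludes exactly the inputs where Python A raises IndexError: arr[i] with N > len(arr).
def Pre_find_longest_prefix_index (arr : List Int) (X : Int) (Y : Int) (N : Int) : Prop :=
  N ≤ (arr.length : Int)
instance (arr : List Int) (X : Int) (Y : Int) (N : Int) : Decidable (Pre_find_longest_prefix_index arr X Y N) := by unfold Pre_find_longest_prefix_index; infer_instance
def pvWitness_find_longest_prefix_index : List Int × Int × Int × Int := ([1, 2, 1, 2], 1, 2, 4)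

def Spec_find_longest_prefix_index (arr : List Int) (X : Int) (Y : Int) (N : Int) (out : Int) : Prop := out = find_longest_prefix_index_alt arr X Y N
instance (arr : List Int) (X : Int) (Y : Int) (N : Int) (out : Int) : Decidable (Spec_find_longest_prefix_index arr X Y N out) := by unfold Spec_find_longest_prefix_index; infer_instance

-- ===== CLAIM (what is proved, stated in full; the proofs are below) =====
def Claim_equal_find_longest_prefix_index : Prop := ∀ (arr : List Int) (X : Int) (Y : Int) (N : Int), Dom_find_longest_prefix_index arr X Y N → Pre_find_longest_prefix_index arr X Y N → Spec_find_longest_prefix_index arr X Y N (find_longest_prefix_index arr X Y N)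

-- ===== LEMMAS AND PROOFS =====

-- appending past the scanned region does not change the backward scan
theorem pvFindZero_append (bal : List Int) (x : Int) :
    ∀ (l : List Int), (∀ i ∈ l, 0 ≤ i ∧ i < (bal.length : Int)) →
      pvFindZero (bal ++ [x]) l = pvFindZero bal l := by
  intro l
  induction l with
  | nil => intro _; rfl
  | cons i rest ih =>
    intro h
    have h0 := h i (by simp)
    simp only [pvFindZero]
    rw [PySem.List.pyGetD_eq_getElem (bal ++ [x]) 0 h0.1 (by simp; omega),
        PySem.List.pyGetD_eq_getElem bal 0 h0.1 (by omega),
        List.getElem_append_left (by omega), ih (fun j hj => h j (by simp [hj]))]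

-- the joint invariant: A's fused loop state vs B's balance table, from position k on
theorem pv_inv (arr : List Int) (X Y N : Int) :
    ∀ (n : Nat) (k : Nat) (cx cy idx b : Int) (bal : List Int),
      (N - (k : Int)).toNat = n → bal.length = k → cx - cy = b →
      idx = pvFindZero bal (PySem.List.pyRange ((k : Int) - 1) (-1) (-1)) →
      ((PySem.List.pyRange (k : Int) N 1).foldl
          (fun (st : Int × Int × Int) i =>
            let v := PySem.List.pyGetD arr i 0
            let p := if v = X then (st.1 + 1, st.2.1)
                     else if v = Y then (st.1, st.2.1 + 1)
                     else (st.1, st.2.1)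
            (p.1, p.2, if p.1 = p.2 then i else st.2.2)) (cx, cy, idx)).2.2 =
        pvFindZero
          ((PySem.List.pyRange (k : Int) N 1).foldl
            (fun (st : List Int × Int) i =>
              let v := PySem.List.pyGetD arr i 0
              let b := if v = X then st.2 + 1 else if v = Y then st.2 - 1 else st.2
              (st.1 ++ [b], b)) (bal, b)).1
          (PySem.List.pyRange
            ((((PySem.List.pyRange (k : Int) N 1).foldl
              (fun (st : List Int × Int) i =>
                let v := PySem.List.pyGetD arr i 0
                let b := if v = X then st.2 + 1 else if v = Y then st.2 - 1 else st.2
                (st.1 ++ [b], b)) (bal, b)).1.length : Int) - 1) (-1) (-1)) := by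
  intro n
  induction n with
  | zero =>
    intro k cx cy idx b bal hn hlen hdiff hidx
    rw [PySem.List.pyRange_one_eq_nil (by omega)]
    simp only [List.foldl_nil]
    subst hlen
    exact hidx
  | succ n ih =>
    intro k cx cy idx b bal hn hlen hdiff hidx
    have hk : (k : Int) < N := by omega
    rw [PySem.List.pyRange_one_cons hk, List.foldl_cons, List.foldl_cons,
        show (k : Int) + 1 = ((k + 1 : Nat) : Int) by push_cast; ring]
    set v := PySem.List.pyGetD arr (k : Int) 0 with hv
    set b' := if v = X then b + 1 else if v = Y then b - 1 else b with hb'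
    set p := if v = X then (cx + 1, cy) else if v = Y then (cx, cy + 1) else (cx, cy) with hp
    have hget : PySem.List.pyGetD (bal ++ [b']) (k : Int) 0 = b' := by
      rw [PySem.List.pyGetD_natCast, ← hlen]
      simp
    have hiff : p.1 = p.2 ↔ b' = 0 := by
      rw [hp, hb']; split_ifs <;> simp <;> omega
    have h3 : p.1 - p.2 = b' := by
      rw [hp, hb']; split_ifs <;> simp <;> omega
    have h4 : (if p.1 = p.2 then (k : Int) else idx) =
        pvFindZero (bal ++ [b'])
          (PySem.List.pyRange (((k + 1 : Nat) : Int) - 1) (-1) (-1)) := by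
      rw [show ((k + 1 : Nat) : Int) - 1 = (k : Int) by push_cast; ring,
          PySem.List.pyRange_neg_one_cons (by omega)]
      simp only [pvFindZero]
      rw [hget, pvFindZero_append bal b' _ (fun i hi => by
        rw [PySem.List.mem_pyRange_neg_one] at hi
        simp only [hlen]; omega), ← hidx]
      by_cases hz : b' = 0
      · rw [if_pos (hiff.mpr hz), if_pos hz]
      · rw [if_neg (fun hh => hz (hiff.mp hh)), if_neg hz]
    exact ih (k + 1) p.1 p.2 (if p.1 = p.2 then (k : Int) else idx) b' (bal ++ [b'])
      (by omega) (by simp [hlen]) h3 h4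

-- ===== VERDICT (by name: the statement is the Claim_ definition above) =====
theorem find_longest_prefix_index_spec : Claim_equal_find_longest_prefix_index := by
  intro arr X Y N _ _
  unfold Spec_find_longest_prefix_index find_longest_prefix_index find_longest_prefix_index_alt
  have h := pv_inv arr X Y N (N - ((0 : Nat) : Int)).toNat 0 0 0 (-1) 0 [] rfl rfl (by ring)
    (by rw [PySem.List.pyRange_neg_one_eq_nil (by omega)]; rfl)
  simpa using h
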